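-- pv_equiv track=rewrite | github.com/rahul118bbsr/Indus-Script-Analysis | ConditionalProbability.py | conditionalProbability
-- ===== SOURCE A (Python) =====
-- def conditionalProbability(fileDir, given):
--     output = {}
--     given = given.strip().split("-")
--     for line in fileDir:
--         line = line.strip().split('-')
--         for i in range (len(line)):
--             startIndex = i
--             stopIndex = i + len(given)
--             if(stopIndex < len(line) and line[startIndex : stopIndex] == given):
--                 nextWord = line[stopIndex]
--                 output.setdefault(nextWord, 0)
--                 output[nextWord] += 1
--     return output
-- ===== SOURCE B (Python) =====
-- def conditionalProbability(fileDir, given):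
--     pat = given.strip().split("-")
--     m = len(pat)
--     followers = []
--     for line in fileDir:
--         suf = line.strip().split('-')
--         while len(suf) > m:
--             if suf[:m] == pat:
--                 followers.append(suf[m])
--             suf = suf[1:]
--     output = {}
--     for w in followers:
--         output[w] = output.get(w, 0) + 1
--     return output
-- ===== Notes on version B (the rewrite author's own statement) =====
-- stated objective: alternative
-- what changed: B replaces A's index-arithmetic scan that updates the dict inside a nested loop by a two-phase design: a suffix-walk that gathers the list of follower tokens (prefix comparison on each tail) and then one counting pass building the dict.
import Mathlib
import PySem

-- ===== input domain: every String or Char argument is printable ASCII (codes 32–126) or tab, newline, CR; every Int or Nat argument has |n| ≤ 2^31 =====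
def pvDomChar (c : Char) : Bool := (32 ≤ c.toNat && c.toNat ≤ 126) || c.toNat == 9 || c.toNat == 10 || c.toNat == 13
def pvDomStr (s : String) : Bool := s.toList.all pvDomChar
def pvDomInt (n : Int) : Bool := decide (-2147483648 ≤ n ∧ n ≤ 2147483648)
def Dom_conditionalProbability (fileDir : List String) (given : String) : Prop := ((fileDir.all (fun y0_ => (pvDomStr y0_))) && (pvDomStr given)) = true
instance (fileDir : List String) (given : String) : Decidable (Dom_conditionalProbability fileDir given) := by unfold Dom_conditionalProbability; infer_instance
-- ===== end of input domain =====

-- B gathers the follower tokens by walking each line's suffixes (prefix test per tail), then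
-- counts them in one separate pass; a different decomposition of the same task (objective: alternative).

def pvSplitDash (s : String) : List String :=
  (PySem.Str.split? (PySem.Str.strip s) "-").getD []   -- exact: split? is none only for sep = ""

-- ===== PORT A =====
def conditionalProbability (fileDir : List String) (given : String) : List (String × Int) :=
  let g := pvSplitDash given
  let output : PySem.Dict String Int :=
    fileDir.foldl (fun output line =>
      let toks := pvSplitDash line
      (PySem.List.pyRange 0 toks.length 1).foldl (fun output i =>
        let startIndex := i
        let stopIndex := i + (g.length : Int)
        if stopIndex < (toks.length : Int) ∧
            PySem.List.slice toks (some startIndex) (some stopIndex) = g then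
          let nextWord := PySem.List.pyGetD toks stopIndex ""
          let output := output.setdefault nextWord 0
          output.insert nextWord (output.getD nextWord 0 + 1)
        else output) output) PySem.Dict.empty
  output.items

-- ===== PORT B =====
-- the while loop 'while len(suf) > m: … ; suf = suf[1:]' of Source B
def pvFollowersLine (pat : List String) : List String → List String
  | [] => []
  | t :: rest =>
    if pat.length < (t :: rest).length then
      (if (t :: rest).take pat.length = pat then [(t :: rest).getD pat.length ""] else []) ++
        pvFollowersLine pat rest
    else []

def conditionalProbability_alt (fileDir : List String) (given : String) : List (String × Int) :=
  let pat := pvSplitDash given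
  let followers :=
    fileDir.foldl (fun acc line =>
      acc ++ pvFollowersLine pat (pvSplitDash line)) []
  let output : PySem.Dict String Int :=
    followers.foldl (fun d w => d.insert w (d.getD w 0 + 1)) PySem.Dict.empty
  output.items

-- ===== PRECONDITION & SPEC =====
def Spec_conditionalProbability (fileDir : List String) (given : String) (out : List (String × Int)) : Prop := out = conditionalProbability_alt fileDir given
instance (fileDir : List String) (given : String) (out : List (String × Int)) : Decidable (Spec_conditionalProbability fileDir given out) := by unfold Spec_conditionalProbability; infer_instance

-- ===== CLAIM (what is proved, stated in full; the proofs are below) =====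
def Claim_equal_conditionalProbability : Prop := ∀ (fileDir : List String) (given : String), Dom_conditionalProbability fileDir given → Spec_conditionalProbability fileDir given (conditionalProbability fileDir given)

-- ===== LEMMAS AND PROOFS =====

theorem pvBumpEq (d : PySem.Dict String Int) (k : String) :
    (d.setdefault k 0).insert k ((d.setdefault k 0).getD k 0 + 1)
      = d.insert k (d.getD k 0 + 1) := by
  by_cases h : d.contains k = true
  · rw [PySem.Dict.setdefault_of_contains d 0 h]
  · have h' : d.contains k = false := by simpa using h
    have hn : d.get? k = none := by
      rw [PySem.Dict.get?_eq_none_iff_contains]; exact h'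
    have hg : d.getD k 0 = 0 := by simp [PySem.Dict.getD, hn]
    rw [PySem.Dict.setdefault_of_not_contains d 0 h', PySem.Dict.getD_insert_self,
        PySem.Dict.insert_insert_self, hg]

theorem pvFollowersChar (pat toks : List String) :
    pvFollowersLine pat toks
      = ((List.range toks.length).filter
            (fun j => decide (j + pat.length < toks.length ∧
              (toks.drop j).take pat.length = pat))).map
          (fun j => toks.getD (j + pat.length) "") := by
  induction toks with
  | nil => simp [pvFollowersLine]
  | cons t rest ih =>
    by_cases hm : pat.length < rest.length + 1
    · rw [pvFollowersLine, if_pos (by simpa using hm)]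
      rw [List.length_cons, List.range_succ_eq_map, List.filter_cons]
      have hq : ((fun j => decide (j + pat.length < rest.length + 1 ∧
              List.take pat.length (List.drop j (t :: rest)) = pat)) ∘ Nat.succ)
          = (fun j => decide (j + pat.length < rest.length ∧
              List.take pat.length (List.drop j rest) = pat)) := by
        funext j
        simp only [Function.comp_apply, List.drop_succ_cons, decide_eq_decide]
        constructor <;> rintro ⟨h1, h2⟩ <;> exact ⟨by omega, h2⟩
      have hg : ((fun j => (t :: rest).getD (j + pat.length) "") ∘ Nat.succ)
          = (fun j => rest.getD (j + pat.length) "") := by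
        funext j
        simp only [Function.comp_apply, Nat.succ_add, List.getD_cons_succ]
      have htail : (((List.range rest.length).map Nat.succ).filter
            (fun j => decide (j + pat.length < rest.length + 1 ∧
              List.take pat.length (List.drop j (t :: rest)) = pat))).map
            (fun j => (t :: rest).getD (j + pat.length) "")
          = pvFollowersLine pat rest := by
        rw [List.filter_map, List.map_map, hq, hg, ih]
      by_cases ht : List.take pat.length (t :: rest) = pat
      · have hc : (0 + pat.length < rest.length + 1 ∧
            List.take pat.length (List.drop 0 (t :: rest)) = pat) :=
          ⟨by omega, by simpa using ht⟩
        rw [if_pos (decide_eq_true hc), List.map_cons, htail]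
        simp [ht]
      · have hc : ¬ (0 + pat.length < rest.length + 1 ∧
            List.take pat.length (List.drop 0 (t :: rest)) = pat) :=
          fun h => ht (by simpa using h.2)
        rw [if_neg (fun h => hc (of_decide_eq_true h)), htail]
        simp [ht]
    · rw [pvFollowersLine, if_neg (by simpa using hm)]
      symm
      rw [List.map_eq_nil_iff, List.filter_eq_nil_iff]
      intro j hj
      simp only [List.mem_range, List.length_cons] at hj
      simp only [decide_eq_true_eq, not_and, List.length_cons]
      intro hlt
      omega

theorem pvFoldlIfMap {ι δ α : Type} (l : List ι) (p : ι → Bool) (f : ι → α)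
    (g : δ → α → δ) (d : δ) :
    l.foldl (fun d i => if p i then g d (f i) else d) d
      = ((l.filter p).map f).foldl g d := by
  induction l generalizing d with
  | nil => rfl
  | cons x xs ih =>
    by_cases h : p x <;> simp [h, ih]

theorem pvInnerEq (pat toks : List String) (d : PySem.Dict String Int) :
    (PySem.List.pyRange 0 toks.length 1).foldl (fun output i =>
        if i + (pat.length : Int) < (toks.length : Int) ∧
            PySem.List.slice toks (some i) (some (i + (pat.length : Int))) = pat then
          (output.setdefault (PySem.List.pyGetD toks (i + (pat.length : Int)) "") 0).insert
            (PySem.List.pyGetD toks (i + (pat.length : Int)) "")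
            ((output.setdefault (PySem.List.pyGetD toks (i + (pat.length : Int)) "") 0).getD
              (PySem.List.pyGetD toks (i + (pat.length : Int)) "") 0 + 1)
        else output) d
      = (pvFollowersLine pat toks).foldl (fun d w => d.insert w (d.getD w 0 + 1)) d := by
  rw [PySem.List.pyRange_zero_natCast, List.foldl_map]
  have hstep : (fun (output : PySem.Dict String Int) (j : Nat) =>
        if (j : Int) + (pat.length : Int) < (toks.length : Int) ∧
            PySem.List.slice toks (some (j : Int)) (some ((j : Int) + (pat.length : Int))) = pat then
          (output.setdefault (PySem.List.pyGetD toks ((j : Int) + (pat.length : Int)) "") 0).insert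
            (PySem.List.pyGetD toks ((j : Int) + (pat.length : Int)) "")
            ((output.setdefault (PySem.List.pyGetD toks ((j : Int) + (pat.length : Int)) "") 0).getD
              (PySem.List.pyGetD toks ((j : Int) + (pat.length : Int)) "") 0 + 1)
        else output)
      = (fun output j =>
          if (fun j => decide (j + pat.length < toks.length ∧
              (toks.drop j).take pat.length = pat)) j then
            (fun d w => d.insert w (d.getD w 0 + 1)) output
              ((fun j => toks.getD (j + pat.length) "") j)
          else output) := by
    funext output j
    have hidx : ((j : Int) + (pat.length : Int)) = (((j + pat.length : Nat)) : Int) := by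
      push_cast; ring
    rw [PySem.List.slice_natCast_add, hidx, PySem.List.pyGetD_natCast]
    by_cases hc : (j + pat.length < toks.length ∧ (toks.drop j).take pat.length = pat)
    · rw [if_pos ⟨by exact_mod_cast hc.1, hc.2⟩, if_pos (decide_eq_true hc)]
      exact pvBumpEq output (toks.getD (j + pat.length) "")
    · rw [if_neg (fun h => hc ⟨by exact_mod_cast h.1, h.2⟩),
          if_neg (fun h => hc (of_decide_eq_true h))]
  rw [hstep]
  exact (pvFoldlIfMap (List.range toks.length)
      (fun j => decide (j + pat.length < toks.length ∧ (toks.drop j).take pat.length = pat))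
      (fun j => toks.getD (j + pat.length) "")
      (fun d w => d.insert w (d.getD w 0 + 1)) d).trans
    (congrArg (List.foldl (fun d w => d.insert w (d.getD w 0 + 1)) d)
      (pvFollowersChar pat toks).symm)

theorem pvFoldlFlatMap {α β δ : Type} (l : List α) (F : α → List β)
    (g : δ → β → δ) (d : δ) :
    (l.flatMap F).foldl g d = l.foldl (fun d x => (F x).foldl g d) d := by
  induction l generalizing d with
  | nil => rfl
  | cons x xs ih => simp [List.flatMap_cons, List.foldl_append, ih]

-- ===== VERDICT (by name: the statement is the Claim_ definition above) =====
theorem conditionalProbability_spec : Claim_equal_conditionalProbability := by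
  intro fileDir given _
  unfold Spec_conditionalProbability conditionalProbability conditionalProbability_alt
  dsimp only
  refine congrArg PySem.Dict.items ?_
  have hB : fileDir.foldl (fun acc line =>
        acc ++ pvFollowersLine (pvSplitDash given) (pvSplitDash line)) []
      = fileDir.flatMap (fun line => pvFollowersLine (pvSplitDash given) (pvSplitDash line)) := by
    rw [PySem.List.foldl_append_eq_flatMap]
    exact List.nil_append _
  rw [hB, pvFoldlFlatMap]
  apply PySem.List.foldl_congr_mem
  intro d line _
  exact pvInnerEq (pvSplitDash given) (pvSplitDash line) d
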